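-- pv_equiv track=rewrite | github.com/aoliverg/MTUOC-old | MTUOC-server/MTUOC_tags.py | isFirstUpperCase
-- ===== SOURCE A (Python) =====
-- def isFirstUpperCase(segment):
--     #UPPERCASES the first letter after tags and symbols
--     symbols=["(","[","¿","¡","'",'"',"«","‹","„","“","‟","❝","❮","⹂","〝","〟","＂","‚","‚","‘","❛","-","—","{"]
--     isUC=False
--     inTag=False
--     pos=0
--     segmentL=list(segment)
--     for car in segmentL:
--         if car=="<":
--             inTag=True
--         elif car==">":
--             inTag=False
--         elif not car in symbols and not inTag and car.isupper():
--             isUC=True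
--             break
--         pos+=1
--     return(isUC)
-- ===== SOURCE B (Python) =====
-- import re
--
-- def isFirstUpperCase(segment):
--     # Remove every tag region (an unclosed '<' runs to end of string; a stray
--     # '>' is kept), then test whether any remaining character is uppercase.
--     return any(c.isupper() for c in re.sub(r'<[^>]*>?', '', segment))
-- ===== Notes on version B (the rewrite author's own statement) =====
-- stated objective: idiomatic
-- what changed: B strips all tag regions with one regex substitution and tests any(c.isupper()), replacing A's character-by-character state machine with inTag/pos flags and a dead symbols list.
import Mathlib
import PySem

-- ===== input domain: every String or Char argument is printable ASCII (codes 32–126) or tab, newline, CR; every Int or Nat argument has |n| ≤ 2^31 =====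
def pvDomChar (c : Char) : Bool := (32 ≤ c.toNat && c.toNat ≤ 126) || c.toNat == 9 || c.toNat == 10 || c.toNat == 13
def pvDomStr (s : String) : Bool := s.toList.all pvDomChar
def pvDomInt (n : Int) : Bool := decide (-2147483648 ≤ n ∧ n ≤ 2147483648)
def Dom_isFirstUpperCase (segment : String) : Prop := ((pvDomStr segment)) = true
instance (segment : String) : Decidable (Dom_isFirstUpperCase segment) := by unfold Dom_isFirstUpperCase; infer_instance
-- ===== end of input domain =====

-- B replaces A's inTag state machine (with its dead symbols/pos machinery) by one
-- regex-style tag removal followed by an any-uppercase test (objective: idiomatic).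

-- ===== PORT A =====
-- the symbols list from A (1-character strings → Char)
def pvSymbols : List Char :=
  ['(', '[', '¿', '¡', '\'', '"', '«', '‹', '„', '“', '‟', '❝', '❮', '⹂', '〝', '〟', '＂', '‚', '‚', '‘', '❛', '-', '—', '{']

-- A's for-loop with break: state = (inTag, pos); isUC becomes the return value
def pvLoopA : List Char → Bool → Nat → Bool
  | [], _, _ => false
  | car :: t, inTag, pos =>
    if car = '<' then pvLoopA t true (pos + 1)
    else if car = '>' then pvLoopA t false (pos + 1)
    else if ¬ pvSymbols.contains car ∧ ¬ inTag ∧ PySem.Chars.isupper car then true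
    else pvLoopA t inTag (pos + 1)

def isFirstUpperCase (segment : String) : Bool :=
  pvLoopA segment.toList false 0

-- ===== PORT B =====
-- Hand port of re.sub(r'<[^>]*>?', '', segment) for this fixed pattern (PySem has
-- no regex): pvDropTag consumes [^>]* then the optional '>', pvStripTags scans
-- left-to-right starting a match at each '<'. Exact for this pattern on all strings.
def pvDropTag : List Char → List Char
  | [] => []
  | c :: t => if c = '>' then t else pvDropTag t

theorem pvDropTag_length_le (cs : List Char) : (pvDropTag cs).length ≤ cs.length := by
  induction cs with
  | nil => simp [pvDropTag]
  | cons c t ih =>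
    simp only [pvDropTag]
    split
    · simp
    · exact Nat.le_succ_of_le ih

def pvStripTags : List Char → List Char
  | [] => []
  | c :: t =>
    if c = '<' then pvStripTags (pvDropTag t) else c :: pvStripTags t
termination_by cs => cs.length
decreasing_by
  · exact Nat.lt_succ_of_le (pvDropTag_length_le t)
  · simp

def isFirstUpperCase_alt (segment : String) : Bool :=
  (pvStripTags segment.toList).any PySem.Chars.isupper

-- ===== PRECONDITION & SPEC =====
def Spec_isFirstUpperCase (segment : String) (out : Bool) : Prop := out = isFirstUpperCase_alt segment
instance (segment : String) (out : Bool) : Decidable (Spec_isFirstUpperCase segment out) := by unfold Spec_isFirstUpperCase; infer_instance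

-- ===== CLAIM (what is proved, stated in full; the proofs are below) =====
def Claim_equal_isFirstUpperCase : Prop := ∀ (segment : String), Dom_isFirstUpperCase segment → Spec_isFirstUpperCase segment (isFirstUpperCase segment)

-- ===== LEMMAS AND PROOFS =====

-- pvLoopA's pos is dead state
theorem pvLoopA_pos (cs : List Char) (inTag : Bool) (p q : Nat) :
    pvLoopA cs inTag p = pvLoopA cs inTag q := by
  induction cs generalizing inTag p q with
  | nil => rfl
  | cons c t ih => simp only [pvLoopA]; split_ifs <;> first | rfl | exact ih _ _ _

-- while inTag, A only looks for '>', exactly what pvDropTag consumes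
theorem pvLoopA_inTag (cs : List Char) (pos : Nat) :
    pvLoopA cs true pos = pvLoopA (pvDropTag cs) false 0 := by
  induction cs generalizing pos with
  | nil => rfl
  | cons c t ih =>
    by_cases hlt : c = '<'
    · simp [pvLoopA, pvDropTag, hlt, ih]
    · by_cases hgt : c = '>'
      · have h1 : pvLoopA (c :: t) true pos = pvLoopA t false (pos + 1) := by
          simp [pvLoopA, hlt, hgt]
        have h2 : pvDropTag (c :: t) = t := by simp [pvDropTag, hgt]
        rw [h1, h2]
        exact pvLoopA_pos t false _ 0
      · simp [pvLoopA, pvDropTag, hlt, hgt, ih]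

-- no symbol is uppercase
theorem pvSymbols_not_upper (c : Char) (h : c ∈ pvSymbols) :
    PySem.Chars.isupper c = false := by
  fin_cases h <;> decide

theorem pvLoopA_eq_strip (n : Nat) (cs : List Char) (hn : cs.length ≤ n) :
    pvLoopA cs false 0 = (pvStripTags cs).any PySem.Chars.isupper := by
  induction n generalizing cs with
  | zero =>
    have : cs = [] := List.eq_nil_of_length_eq_zero (Nat.le_zero.mp hn)
    subst this; simp [pvLoopA, pvStripTags]
  | succ n ih =>
    cases cs with
    | nil => simp [pvLoopA, pvStripTags]
    | cons c t =>
      have ht : t.length ≤ n := Nat.lt_succ_iff.mp (by simpa using hn)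
      by_cases hlt : c = '<'
      · have hd : (pvDropTag t).length ≤ n := le_trans (pvDropTag_length_le t) ht
        calc pvLoopA (c :: t) false 0 = pvLoopA t true 1 := by simp [pvLoopA, hlt]
          _ = pvLoopA (pvDropTag t) false 0 := pvLoopA_inTag t 1
          _ = (pvStripTags (pvDropTag t)).any PySem.Chars.isupper := ih _ hd
          _ = (pvStripTags (c :: t)).any PySem.Chars.isupper := by
                rw [pvStripTags]; simp [hlt]
      · by_cases hgt : c = '>'
        · calc pvLoopA (c :: t) false 0 = pvLoopA t false 1 := by simp [pvLoopA, hlt, hgt]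
            _ = pvLoopA t false 0 := pvLoopA_pos t false 1 0
            _ = (pvStripTags t).any PySem.Chars.isupper := ih _ ht
            _ = (pvStripTags (c :: t)).any PySem.Chars.isupper := by
                  rw [pvStripTags]
                  simp [hgt, (by decide : PySem.Chars.isupper '>' = false)]
        · by_cases hu : PySem.Chars.isupper c
          · have hmem : ¬ pvSymbols.contains c := by
              intro hc
              have := pvSymbols_not_upper c (List.contains_iff_mem.mp hc)
              rw [this] at hu; exact absurd hu (by simp)
            have hL : pvLoopA (c :: t) false 0 = true := by
              simp only [pvLoopA]
              rw [if_neg hlt, if_neg hgt, if_pos ⟨hmem, by simp, hu⟩]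
            rw [hL, pvStripTags]
            simp [hlt, hu]
          · have hL : pvLoopA (c :: t) false 0 = pvLoopA t false 1 := by
              simp only [pvLoopA]
              rw [if_neg hlt, if_neg hgt, if_neg (by simp [hu])]
            calc pvLoopA (c :: t) false 0 = pvLoopA t false 1 := hL
              _ = pvLoopA t false 0 := pvLoopA_pos t false 1 0
              _ = (pvStripTags t).any PySem.Chars.isupper := ih _ ht
              _ = (pvStripTags (c :: t)).any PySem.Chars.isupper := by
                    rw [pvStripTags]
                    simp [hlt, hu]

-- ===== VERDICT (by name: the statement is the Claim_ definition above) =====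
theorem isFirstUpperCase_spec : Claim_equal_isFirstUpperCase := by
  intro segment _
  unfold Spec_isFirstUpperCase isFirstUpperCase isFirstUpperCase_alt
  exact pvLoopA_eq_strip segment.toList.length segment.toList le_rfl
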